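-- pv_equiv track=rewrite | github.com/intzy/ProjectEuler | src/pb516.py | get_hamming_numbers
-- ===== SOURCE A (Python) =====
-- def get_hamming_numbers(limit):
--     hamming_numbers = []
--     p2 = 1
--     while p2 <= limit:
--         p3 = 1
--         while p3 * p2 <= limit:
--             x = p2 * p3
--             while x <= limit:
--                 hamming_numbers.append(x)
--                 x *= 5
--             p3 *= 3
--         p2 *= 2
--     return hamming_numbers
-- ===== SOURCE B (Python) =====
-- def get_hamming_numbers(limit):
--     primes = [2, 3, 5]
--     result = []
--
--     def rec(i, value):
--         if i == len(primes):
--             result.append(value)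
--             return
--         p = primes[i]
--         while value <= limit:
--             rec(i + 1, value)
--             value *= p
--
--     rec(0, 1)
--     return result
-- ===== Notes on version B (the rewrite author's own statement) =====
-- stated objective: alternative
-- what changed: The three hand-written nested while-loops (one per prime) are replaced by a single recursive helper over the list of the three primes that appends at depth 3, generalising the enumeration to any prime list while producing the identical order.
import Mathlib
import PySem

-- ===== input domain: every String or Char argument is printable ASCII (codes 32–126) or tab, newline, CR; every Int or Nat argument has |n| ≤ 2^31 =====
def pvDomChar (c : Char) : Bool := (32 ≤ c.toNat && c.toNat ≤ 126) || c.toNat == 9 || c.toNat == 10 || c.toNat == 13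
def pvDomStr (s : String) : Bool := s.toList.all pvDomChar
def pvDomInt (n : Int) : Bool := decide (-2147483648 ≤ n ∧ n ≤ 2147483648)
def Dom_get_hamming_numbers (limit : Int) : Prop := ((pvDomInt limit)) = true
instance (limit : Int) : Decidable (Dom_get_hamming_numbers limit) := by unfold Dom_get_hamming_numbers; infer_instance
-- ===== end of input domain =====

-- B replaces the three hand-written nested while-loops by one recursive helper over the prime
-- list of the three primes (alternative decomposition, same enumeration order); equal output proved on Dom.


-- ===== PORT A =====
-- innermost loop: while x <= limit: append x; x *= 5   (x stays positive, which bounds the loop)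
def hamLoop5 (limit x : Int) (hx : 0 < x) (acc : List Int) : List Int :=
  if _h : x ≤ limit then hamLoop5 limit (x * 5) (by positivity) (acc ++ [x]) else acc
  termination_by (limit + 1 - x).toNat
  decreasing_by omega

-- middle loop: while p3 * p2 <= limit: inner loop from x = p2 * p3; p3 *= 3
def hamLoop3 (limit p2 p3 : Int) (h2 : 0 < p2) (h3 : 0 < p3) (acc : List Int) : List Int :=
  if _h : p3 * p2 ≤ limit then
    hamLoop3 limit p2 (p3 * 3) h2 (by positivity)
      (hamLoop5 limit (p2 * p3) (by positivity) acc)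
  else acc
  termination_by (limit + 1 - p3 * p2).toNat
  decreasing_by
    have hpos : 0 < p3 * p2 := by positivity
    have : p3 * 3 * p2 = 3 * (p3 * p2) := by ring
    rw [this]; omega

-- outer loop: while p2 <= limit: middle loop from p3 = 1; p2 *= 2
def hamLoop2 (limit p2 : Int) (h2 : 0 < p2) (acc : List Int) : List Int :=
  if _h : p2 ≤ limit then
    hamLoop2 limit (p2 * 2) (by positivity) (hamLoop3 limit p2 1 h2 one_pos acc)
  else acc
  termination_by (limit + 1 - p2).toNat
  decreasing_by omega

def get_hamming_numbers (limit : Int) : List Int := hamLoop2 limit 1 one_pos []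

-- ===== PORT B =====
-- rec(i, value): at the end of the prime list append value; else while value <= limit:
-- rec(i+1, value); value *= p.  The list `ps` is the suffix primes[i:].
def hamRec (limit : Int) (ps : List Int) (v : Int) (hps : ∀ p ∈ ps, 2 ≤ p) (hv : 0 < v)
    (acc : List Int) : List Int :=
  match ps with
  | [] => acc ++ [v]
  | p :: rest =>
    if _h : v ≤ limit then
      hamRec limit (p :: rest) (v * p)
        (hps)
        (by have := hps p (by simp); positivity)
        (hamRec limit rest v (fun q hq => hps q (by simp [hq])) hv acc)
    else acc
  termination_by (ps.length, (limit + 1 - v).toNat)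
  decreasing_by
  · left; simp
  · have hp : 2 ≤ p := hps p (by simp)
    have : v + 1 ≤ v * p := by nlinarith
    apply Prod.Lex.right
    omega

def get_hamming_numbers_alt (limit : Int) : List Int :=
  hamRec limit [2, 3, 5] 1 (by intro p hp; fin_cases hp <;> norm_num) one_pos []

-- ===== PRECONDITION & SPEC =====
def Spec_get_hamming_numbers (limit : Int) (out : List Int) : Prop := out = get_hamming_numbers_alt limit
instance (limit : Int) (out : List Int) : Decidable (Spec_get_hamming_numbers limit out) := by unfold Spec_get_hamming_numbers; infer_instance

-- ===== CLAIM (what is proved, stated in full; the proofs are below) =====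
def Claim_equal_get_hamming_numbers : Prop := ∀ (limit : Int), Dom_get_hamming_numbers limit → Spec_get_hamming_numbers limit (get_hamming_numbers limit)

-- ===== LEMMAS AND PROOFS =====
lemma hamRec_nil (limit v : Int) (h1 h2) (acc : List Int) :
    hamRec limit [] v h1 h2 acc = acc ++ [v] := by
  rw [hamRec]

lemma hamRec_congr (limit : Int) (ps : List Int) {v v' : Int} (h : v = v') (hps hps' hv hv')
    (acc : List Int) : hamRec limit ps v hps hv acc = hamRec limit ps v' hps' hv' acc := by
  subst h; rfl

lemma hamLoop5_congr (limit : Int) {x x' : Int} (h : x = x') (hx hx') (acc : List Int) :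
    hamLoop5 limit x hx acc = hamLoop5 limit x' hx' acc := by
  subst h; rfl

lemma level5 (limit x : Int) (hx : 0 < x) (hps hv) (acc : List Int) :
    hamRec limit [5] x hps hv acc = hamLoop5 limit x hx acc := by
  rw [hamRec, hamLoop5]
  split
  · rw [hamRec_nil]
    exact level5 limit (x * 5) (by positivity) _ _ (acc ++ [x])
  · rfl
  termination_by (limit + 1 - x).toNat
  decreasing_by omega

lemma level3 (limit p2 p3 : Int) (h2 : 0 < p2) (h3 : 0 < p3) (hps hv) (acc : List Int) :
    hamRec limit [3, 5] (p3 * p2) hps hv acc = hamLoop3 limit p2 p3 h2 h3 acc := by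
  rw [hamRec, hamLoop3]
  split
  · have hinner : hamRec limit [5] (p3 * p2) (fun q hq => hps q (by simp at hq ⊢; omega)) hv acc
        = hamLoop5 limit (p2 * p3) (by positivity) acc :=
      (level5 limit (p3 * p2) (by positivity) _ _ acc).trans
        (hamLoop5_congr limit (by ring) _ _ acc)
    rw [hinner]
    exact (hamRec_congr limit [3, 5] (show p3 * p2 * 3 = p3 * 3 * p2 by ring) hps hps
        (by positivity) (by positivity) _).trans
      (level3 limit p2 (p3 * 3) h2 (by positivity) hps (by positivity) _)
  · rfl
  termination_by (limit + 1 - p3 * p2).toNat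
  decreasing_by
    have : p3 * 3 * p2 = 3 * (p3 * p2) := by ring
    omega

lemma level2 (limit p2 : Int) (h2 : 0 < p2) (hps hv) (acc : List Int) :
    hamRec limit [2, 3, 5] p2 hps hv acc = hamLoop2 limit p2 h2 acc := by
  rw [hamRec, hamLoop2]
  split
  · have hbody : hamRec limit [3, 5] p2 (fun q hq => hps q (by simp at hq ⊢; omega)) hv acc
        = hamLoop3 limit p2 1 h2 one_pos acc :=
      (hamRec_congr limit [3, 5] (show p2 = 1 * p2 by ring)
          (fun q hq => hps q (by simp at hq ⊢; omega)) (fun q hq => hps q (by simp at hq ⊢; omega))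
          hv (by positivity) acc).trans
        (level3 limit p2 1 h2 one_pos (fun q hq => hps q (by simp at hq ⊢; omega)) (by positivity) acc)
    rw [hbody]
    exact level2 limit (p2 * 2) (by positivity) _ _ _
  · rfl
  termination_by (limit + 1 - p2).toNat
  decreasing_by omega

-- ===== VERDICT (by name: the statement is the Claim_ definition above) =====
theorem get_hamming_numbers_spec : Claim_equal_get_hamming_numbers := by
  intro limit _
  unfold Spec_get_hamming_numbers get_hamming_numbers get_hamming_numbers_alt
  exact (level2 limit 1 one_pos _ _ []).symm
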